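-- pv_equiv track=rewrite | github.com/TBergh98/scrapiens | scraper/keywords_reader.py | create_keyword_to_recipients_map
-- ===== SOURCE A (Python) =====
-- from typing import Dict, List, Any, Tuple
--
-- def create_keyword_to_recipients_map(keywords_dict: Dict[str, List[str]]) -> Dict[str, List[str]]:
--     """
--     Create a reverse mapping from keywords to recipients.
--
--     Args:
--         keywords_dict: Mapping of email to keywords list
--
--     Returns:
--         Dictionary mapping each keyword to list of emails interested in it
--         Format: {keyword: [email1, email2, ...]}
--
--     Example:
--         >>> kw_dict = {"mario@email.it": ["ricerca", "bio"], "anna@email.it": ["ricerca"]}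
--         >>> create_keyword_to_recipients_map(kw_dict)
--         {'ricerca': ['mario@email.it', 'anna@email.it'], 'bio': ['mario@email.it']}
--     """
--     reverse_map = {}
--
--     for email, keywords in keywords_dict.items():
--         for keyword in keywords:
--             if keyword not in reverse_map:
--                 reverse_map[keyword] = []
--             if email not in reverse_map[keyword]:
--                 reverse_map[keyword].append(email)
--
--     return reverse_map
-- ===== SOURCE B (Python) =====
-- def create_keyword_to_recipients_map(keywords_dict):
--     # pass 1: distinct keywords in first-appearance order
--     order = []
--     for keywords in keywords_dict.values():
--         for keyword in keywords:
--             if keyword not in order: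
--                 order.append(keyword)
--     # pass 2: for each keyword, collect the emails whose list mentions it
--     return {keyword: [email for email, keywords in keywords_dict.items()
--                       if keyword in keywords]
--             for keyword in order}
-- ===== Notes on version B (the rewrite author's own statement) =====
-- stated objective: alternative
-- what changed: Replaces A's single pass that incrementally inserts into and mutates a reverse dict with two phases: first collect the distinct keywords in first-appearance order, then build each keyword's email list by a fresh scan over the items; no dict mutation and no per-email membership test on the growing lists.
import Mathlib
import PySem

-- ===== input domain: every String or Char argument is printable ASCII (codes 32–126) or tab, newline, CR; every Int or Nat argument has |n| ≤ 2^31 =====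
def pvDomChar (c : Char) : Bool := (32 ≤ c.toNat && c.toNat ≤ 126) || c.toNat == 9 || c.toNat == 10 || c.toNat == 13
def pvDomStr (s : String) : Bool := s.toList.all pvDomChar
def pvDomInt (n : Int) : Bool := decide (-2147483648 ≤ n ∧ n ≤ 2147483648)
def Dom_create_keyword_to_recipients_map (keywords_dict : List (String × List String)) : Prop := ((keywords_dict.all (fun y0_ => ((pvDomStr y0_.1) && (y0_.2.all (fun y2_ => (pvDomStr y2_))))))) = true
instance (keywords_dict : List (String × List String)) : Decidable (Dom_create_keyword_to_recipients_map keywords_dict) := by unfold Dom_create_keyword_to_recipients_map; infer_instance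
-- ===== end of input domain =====

-- B replaces A's single pass with incremental dict mutation by two phases (collect distinct
-- keywords in first-appearance order, then one fresh scan over the items per keyword); an
-- alternative decomposition of similar cost, not claimed faster.


-- ===== PORT A =====
-- the body of A's inner 'for keyword in keywords' loop (email fixed)
def pvStepA (email : String) (rm : PySem.Dict String (List String)) (keyword : String) :
    PySem.Dict String (List String) :=
  let rm := if rm.contains keyword then rm else rm.insert keyword []
  if email ∈ rm.getD keyword [] then rm else rm.modify keyword [] (fun l => l ++ [email])

def create_keyword_to_recipients_map (keywords_dict : List (String × List String)) :
    List (String × List String) :=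
  (keywords_dict.foldl (fun rm p => p.2.foldl (pvStepA p.1) rm) PySem.Dict.empty).items

-- ===== PORT B =====
-- pass 1 of B: distinct keywords in first-appearance order
def pvOrder (keywords_dict : List (String × List String)) : List String :=
  keywords_dict.foldl
    (fun order p => p.2.foldl (fun order kw => if kw ∈ order then order else order ++ [kw]) order) []

def create_keyword_to_recipients_map_alt (keywords_dict : List (String × List String)) :
    List (String × List String) :=
  (pvOrder keywords_dict).map
    (fun kw => (kw, (keywords_dict.filter (fun p => decide (kw ∈ p.2))).map Prod.fst))

-- ===== PRECONDITION & SPEC =====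
-- Pre_ only expresses that the input represents a Python dict (keys are unique); it excludes
-- nothing a Python dict argument can be.
def Pre_create_keyword_to_recipients_map (keywords_dict : List (String × List String)) : Prop :=
  (keywords_dict.map Prod.fst).Nodup
instance (keywords_dict : List (String × List String)) :
    Decidable (Pre_create_keyword_to_recipients_map keywords_dict) := by
  unfold Pre_create_keyword_to_recipients_map; infer_instance

def pvWitness_create_keyword_to_recipients_map : (List (String × List String)) :=
  [("mario@email.it", ["ricerca", "bio"]), ("anna@email.it", ["ricerca"])]

def Spec_create_keyword_to_recipients_map (keywords_dict : List (String × List String))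
    (out : List (String × List String)) : Prop :=
  out = create_keyword_to_recipients_map_alt keywords_dict
instance (keywords_dict : List (String × List String)) (out : List (String × List String)) :
    Decidable (Spec_create_keyword_to_recipients_map keywords_dict out) := by
  unfold Spec_create_keyword_to_recipients_map; infer_instance

-- ===== CLAIM (what is proved, stated in full; the proofs are below) =====
def Claim_equal_create_keyword_to_recipients_map : Prop :=
  ∀ (keywords_dict : List (String × List String)),
    Dom_create_keyword_to_recipients_map keywords_dict →
    Pre_create_keyword_to_recipients_map keywords_dict →
    Spec_create_keyword_to_recipients_map keywords_dict
      (create_keyword_to_recipients_map keywords_dict)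

-- ===== LEMMAS AND PROOFS =====

-- proof-side names for the pieces of B
def kwAdd (order : List String) (kw : String) : List String :=
  if kw ∈ order then order else order ++ [kw]

def kwF (order : List String) (kws : List String) : List String := kws.foldl kwAdd order

def dkAll (es : List (String × List String)) : List String :=
  es.foldl (fun a p => kwF a p.2) []

def emls (es : List (String × List String)) (k : String) : List String :=
  (es.filter (fun p => decide (k ∈ p.2))).map Prod.fst

lemma pvOrder_eq (kd : List (String × List String)) : pvOrder kd = dkAll kd := rfl

lemma mem_kwF (k : String) (kws : List String) : ∀ order,
    k ∈ kwF order kws ↔ k ∈ order ∨ k ∈ kws := by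
  induction kws with
  | nil => simp [kwF]
  | cons a t ih =>
    intro order
    simp only [kwF, List.foldl_cons]
    rw [show t.foldl kwAdd (kwAdd order a) = kwF (kwAdd order a) t from rfl, ih]
    by_cases h : a ∈ order <;> simp [kwAdd, h] <;> aesop

lemma nodup_kwF (kws : List String) : ∀ order : List String,
    order.Nodup → (kwF order kws).Nodup := by
  induction kws with
  | nil => intro order h; simpa [kwF] using h
  | cons a t ih =>
    intro order h
    simp only [kwF, List.foldl_cons]
    apply ih
    by_cases ha : a ∈ order
    · simpa [kwAdd, ha] using h
    · simp only [kwAdd, ha, if_false, List.nodup_append, List.nodup_cons]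
      refine ⟨h, by simp, fun x hx => by simp; exact fun hxa => ha (hxa ▸ hx)⟩

lemma nodup_dkAll (es : List (String × List String)) : (dkAll es).Nodup := by
  suffices h : ∀ (l : List (String × List String)) (order : List String), order.Nodup →
      (l.foldl (fun a p => kwF a p.2) order).Nodup by
    exact h es [] List.nodup_nil
  intro l
  induction l with
  | nil => intro order h; simpa using h
  | cons a t ih => intro order h; exact ih _ (nodup_kwF _ _ h)

lemma mem_dkAll (k : String) (es : List (String × List String)) :
    k ∈ dkAll es ↔ ∃ p ∈ es, k ∈ p.2 := by
  suffices h : ∀ (l : List (String × List String)) (order : List String),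
      k ∈ l.foldl (fun a p => kwF a p.2) order ↔ k ∈ order ∨ ∃ p ∈ l, k ∈ p.2 by
    simpa using h es []
  intro l
  induction l with
  | nil => simp
  | cons a t ih => intro order; rw [List.foldl_cons, ih, mem_kwF]; aesop

lemma emls_of_not_mem_dkAll {k : String} {es : List (String × List String)}
    (h : k ∉ dkAll es) : emls es k = [] := by
  simp only [emls, List.map_eq_nil_iff, List.filter_eq_nil_iff]
  intro p hp
  simp only [decide_eq_true_eq]
  exact fun hk => h ((mem_dkAll k es).2 ⟨p, hp, hk⟩)

lemma mem_emls_sub {x k : String} {es : List (String × List String)}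
    (h : x ∈ emls es k) : x ∈ es.map Prod.fst := by
  simp only [emls, List.mem_map] at h
  obtain ⟨p, hp, rfl⟩ := h
  exact List.mem_map_of_mem (List.mem_of_mem_filter hp)

lemma emls_append (es : List (String × List String)) (e : String) (kws : List String)
    (k : String) : emls (es ++ [(e, kws)]) k = emls es k ++ if k ∈ kws then [e] else [] := by
  simp only [emls, List.filter_append]
  by_cases h : k ∈ kws <;> simp [h]

-- the state of A's loop, after entries es and the keyword-prefix p of the current entry (e, _)
def St (es : List (String × List String)) (e : String) (p : List String) :
    PySem.Dict String (List String) :=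
  PySem.Dict.mk ((kwF (dkAll es) p).map (fun k => (k, emls es k ++ if k ∈ p then [e] else [])))

lemma keys_St (es : List (String × List String)) (e : String) (p : List String) :
    (St es e p).keys = kwF (dkAll es) p := by
  simp [St, PySem.Dict.keys, Function.comp_def]

lemma contains_St (es : List (String × List String)) (e : String) (p : List String)
    (kw : String) : (St es e p).contains kw = decide (kw ∈ kwF (dkAll es) p) := by
  rw [PySem.Dict.contains_eq_decide_mem_keys, keys_St]

lemma getD_St (es : List (String × List String)) (e : String) (p : List String)
    {kw : String} (h : kw ∈ kwF (dkAll es) p) :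
    (St es e p).getD kw [] = emls es kw ++ if kw ∈ p then [e] else [] := by
  apply PySem.Dict.getD_of_mem_items
  · simp only [St, List.mem_map]
    exact ⟨kw, h, rfl⟩
  · rw [keys_St]; exact nodup_kwF _ _ (nodup_dkAll es)

lemma step_St (es : List (String × List String)) (e : String) (p : List String)
    (kw : String) (he : e ∉ es.map Prod.fst) :
    pvStepA e (St es e p) kw = St es e (p ++ [kw]) := by
  have hee : e ∉ emls es kw := fun h => he (mem_emls_sub h)
  have hnd : (kwF (dkAll es) p).Nodup := nodup_kwF _ _ (nodup_dkAll es)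
  by_cases hkw : kw ∈ kwF (dkAll es) p
  · -- keyword already has an entry
    have hK' : kwF (dkAll es) (p ++ [kw]) = kwF (dkAll es) p := by
      simp only [kwF, List.foldl_append, List.foldl_cons, List.foldl_nil, kwAdd,
        show kw ∈ List.foldl kwAdd (dkAll es) p from hkw, if_true]
    have hget := getD_St es e p hkw
    by_cases hp : kw ∈ p
    · -- email already recorded for kw: no change at all
      have hmem : e ∈ (St es e p).getD kw [] := by rw [hget]; simp [hp]
      simp only [pvStepA, contains_St, hkw, decide_true, if_true, hmem]
      apply PySem.Dict.ext
      simp only [St, hK']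
      apply List.map_congr_left
      intro k hk
      by_cases hkkw : k = kw
      · subst hkkw; simp [hp]
      · simp [List.mem_append, hkkw]
    · -- append e to kw's list
      have hmem : e ∉ (St es e p).getD kw [] := by rw [hget]; simp [hp, hee]
      simp only [pvStepA, contains_St, hkw, decide_true, if_true, hmem, if_false]
      unfold PySem.Dict.modify
      rw [hget]
      have hcon : (St es e p).contains kw = true := by simp [contains_St, hkw]
      apply PySem.Dict.ext
      rw [PySem.Dict.items_insert_of_contains _ _ hcon]
      simp only [St, hK', List.map_map]
      apply List.map_congr_left
      intro k hk
      by_cases hkkw : k = kw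
      · subst hkkw; simp [hp]
      · simp [Function.comp, hkkw, List.mem_append]
  · -- fresh keyword: insert [] then append e
    have hcon : (St es e p).contains kw = false := by simp [contains_St, hkw]
    have hkdk : kw ∉ dkAll es := fun h => hkw ((mem_kwF kw p _).2 (Or.inl h))
    have hkp : kw ∉ p := fun h => hkw ((mem_kwF kw p _).2 (Or.inr h))
    have hK' : kwF (dkAll es) (p ++ [kw]) = kwF (dkAll es) p ++ [kw] := by
      unfold kwF kwAdd at hkw ⊢
      rw [List.foldl_append, List.foldl_cons, List.foldl_nil, if_neg hkw]
    have hins : ((St es e p).insert kw []).items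
        = (St es e p).items ++ [(kw, ([] : List String))] :=
      PySem.Dict.items_insert_of_not_contains _ _ hcon
    have hget : ((St es e p).insert kw []).getD kw [] = ([] : List String) :=
      PySem.Dict.getD_insert_self _ _ _ _
    have hcon2 : ((St es e p).insert kw []).contains kw = true :=
      PySem.Dict.contains_insert_self _ _ _
    have hstep : pvStepA e (St es e p) kw
        = ((St es e p).insert kw []).insert kw ([] ++ [e]) := by
      unfold pvStepA
      rw [contains_St,
        if_neg (show ¬(decide (kw ∈ kwF (dkAll es) p) = true) by simp [hkw])]
      unfold PySem.Dict.modify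
      simp [hget]
    rw [hstep]
    apply PySem.Dict.ext
    rw [PySem.Dict.items_insert_of_contains _ _ hcon2, hins, List.nil_append]
    simp only [St, hK', List.map_append, List.map_map]
    congr 1
    · apply List.map_congr_left
      intro k hk
      have hkkw : k ≠ kw := fun h => hkw (h ▸ hk)
      simp [Function.comp, hkkw, List.mem_append]
    · simp [emls_of_not_mem_dkAll hkdk]

lemma fold_St (es : List (String × List String)) (e : String)
    (he : e ∉ es.map Prod.fst) : ∀ (kws p : List String),
    kws.foldl (pvStepA e) (St es e p) = St es e (p ++ kws) := by
  intro kws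
  induction kws with
  | nil => intro p; simp
  | cons a t ih =>
    intro p
    rw [List.foldl_cons, step_St es e p a he, ih]
    simp

-- the state after a list of whole entries
def Big (es : List (String × List String)) : PySem.Dict String (List String) :=
  PySem.Dict.mk ((dkAll es).map (fun k => (k, emls es k)))

lemma St_nil (es : List (String × List String)) (e : String) : St es e [] = Big es := by
  apply PySem.Dict.ext
  simp [St, Big, kwF]

lemma St_full (es : List (String × List String)) (e : String) (kws : List String) :
    St es e kws = Big (es ++ [(e, kws)]) := by
  apply PySem.Dict.ext
  have hdk : dkAll (es ++ [(e, kws)]) = kwF (dkAll es) kws := by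
    simp [dkAll, List.foldl_append]
  simp only [St, Big, hdk]
  apply List.map_congr_left
  intro k hk
  rw [emls_append]

lemma outer_fold : ∀ (d es : List (String × List String)),
    ((es ++ d).map Prod.fst).Nodup →
    d.foldl (fun rm p => p.2.foldl (pvStepA p.1) rm) (Big es) = Big (es ++ d) := by
  intro d
  induction d with
  | nil => intro es h; simp
  | cons a t ih =>
    intro es h
    have he : a.1 ∉ es.map Prod.fst := by
      simp only [List.map_append, List.nodup_append, List.map_cons] at h
      intro hmem
      exact h.2.2 a.1 hmem a.1 (by simp) rfl
    rw [List.foldl_cons, ← St_nil es a.1, fold_St es a.1 he a.2 [], List.nil_append,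
      St_full es a.1 a.2]
    have h2 : (((es ++ [(a.1, a.2)]) ++ t).map Prod.fst).Nodup := by
      simpa [List.append_assoc] using h
    have := ih (es ++ [(a.1, a.2)]) h2
    simpa [List.append_assoc] using this

-- ===== VERDICT (by name: the statement is the Claim_ definition above) =====
theorem create_keyword_to_recipients_map_spec : Claim_equal_create_keyword_to_recipients_map := by
  intro kd _ hpre
  show create_keyword_to_recipients_map kd = create_keyword_to_recipients_map_alt kd
  unfold create_keyword_to_recipients_map create_keyword_to_recipients_map_alt
  have hempty : PySem.Dict.empty = Big ([] : List (String × List String)) := by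
    apply PySem.Dict.ext; simp [Big, dkAll, PySem.Dict.empty]
  rw [hempty, outer_fold kd [] (by simpa using hpre)]
  simp only [List.nil_append, Big, pvOrder_eq]
  rfl
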